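-- pv_equiv track=rewrite | github.com/christianCITS/Exercises-on-Python-Fundamentals | WORLD_cup_Svolgimento.py | giocatorePiuEdizioni
-- ===== SOURCE A (Python) =====
-- def  giocatorePiuEdizioni(w):
--       gpd={}
--
--       for v in w:
--             if v["FullName"] in gpd.keys():
--                   gpd[v["FullName"]]=gpd[v["FullName"]]+1
--             else:
--                   gpd[v["FullName"]]=1
--       return gpd
-- ===== SOURCE B (Python) =====
-- def giocatorePiuEdizioni(w):
--     names = [v["FullName"] for v in w]
--     return {n: names.count(n) for n in dict.fromkeys(names)}
-- ===== Notes on version B (the rewrite author's own statement) =====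
-- stated objective: alternative
-- what changed: B replaces A's incremental per-element dict counting with a two-phase pass: extract the name list, order-preserving dedup via dict.fromkeys, then a dict comprehension counting each distinct name with names.count(n).
import Mathlib
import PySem

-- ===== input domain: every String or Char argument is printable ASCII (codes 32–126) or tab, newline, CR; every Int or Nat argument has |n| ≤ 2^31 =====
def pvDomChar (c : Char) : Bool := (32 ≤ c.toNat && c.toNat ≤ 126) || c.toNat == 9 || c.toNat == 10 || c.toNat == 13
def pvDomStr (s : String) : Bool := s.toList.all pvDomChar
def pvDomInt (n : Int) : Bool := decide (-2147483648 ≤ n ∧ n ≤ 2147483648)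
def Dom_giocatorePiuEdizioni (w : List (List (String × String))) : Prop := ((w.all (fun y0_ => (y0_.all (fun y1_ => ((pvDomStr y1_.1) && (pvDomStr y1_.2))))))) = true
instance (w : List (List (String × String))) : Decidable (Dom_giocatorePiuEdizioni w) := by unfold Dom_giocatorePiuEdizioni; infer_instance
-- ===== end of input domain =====

-- ===== PORT A =====
-- A: incremental counting — one dict, each name looked up and incremented (or set to 1).
-- Both ports look a name up with Dict.getD … ""; under Pre_ the key is present, so the default is never used
-- (in Python a missing "FullName" raises KeyError, which Pre_ excludes).
def giocatorePiuEdizioni (w : List (List (String × String))) : List (String × Int) :=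
  (w.foldl
    (fun gpd v =>
      let name := (PySem.Dict.ofList v).getD "FullName" ""
      if gpd.contains name then
        gpd.insert name (gpd.getD name 0 + 1)
      else
        gpd.insert name 1)
    (PySem.Dict.empty : PySem.Dict String Int)).items

-- ===== PORT B =====
-- B: extract all names, then build {n: names.count(n) for n in dict.fromkeys(names)}.
def giocatorePiuEdizioni_alt (w : List (List (String × String))) : List (String × Int) :=
  let names := w.map (fun v => (PySem.Dict.ofList v).getD "FullName" "")
  (PySem.Dict.ofList
    ((PySem.List.dedup names).map
      (fun n => (n, (PySem.List.count names n : Int))))).items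

-- ===== PRECONDITION & SPEC =====
-- Pre_: every element dict has the key "FullName"; on a missing key the Python A (and B) raises KeyError.
def Pre_giocatorePiuEdizioni (w : List (List (String × String))) : Prop :=
  ∀ v ∈ w, ((PySem.Dict.ofList v).get? "FullName").isSome = true
instance (w : List (List (String × String))) : Decidable (Pre_giocatorePiuEdizioni w) := by
  unfold Pre_giocatorePiuEdizioni; infer_instance
def pvWitness_giocatorePiuEdizioni : (List (List (String × String))) :=
  [[("FullName", "Rossi")], [("FullName", "Maier")], [("FullName", "Rossi")]]
def Spec_giocatorePiuEdizioni (w : List (List (String × String))) (out : List (String × Int)) : Prop := out = giocatorePiuEdizioni_alt w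
instance (w : List (List (String × String))) (out : List (String × Int)) : Decidable (Spec_giocatorePiuEdizioni w out) := by unfold Spec_giocatorePiuEdizioni; infer_instance

-- ===== CLAIM (what is proved, stated in full; the proofs are below) =====
def Claim_equal_giocatorePiuEdizioni : Prop := ∀ (w : List (List (String × String))), Dom_giocatorePiuEdizioni w → Pre_giocatorePiuEdizioni w → Spec_giocatorePiuEdizioni w (giocatorePiuEdizioni w)

-- ===== LEMMAS AND PROOFS =====

-- A's loop over w is the counting loop over the extracted name list.
lemma giocatorePiuEdizioni_eq_counter_items (w : List (List (String × String))) :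
    giocatorePiuEdizioni w =
      (PySem.Dict.counter (w.map (fun v => (PySem.Dict.ofList v).getD "FullName" ""))).items := by
  unfold giocatorePiuEdizioni
  rw [← PySem.Dict.foldl_insert_getD_add_one_eq_counter, List.foldl_map]
  have hf : (fun (gpd : PySem.Dict String Int) (v : List (String × String)) =>
        let name := (PySem.Dict.ofList v).getD "FullName" ""
        if gpd.contains name then gpd.insert name (gpd.getD name 0 + 1)
        else gpd.insert name 1) =
      (fun (gpd : PySem.Dict String Int) v =>
        gpd.insert ((PySem.Dict.ofList v).getD "FullName" "")
          (gpd.getD ((PySem.Dict.ofList v).getD "FullName" "") 0 + 1)) := by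
    funext gpd v
    by_cases h : gpd.contains ((PySem.Dict.ofList v).getD "FullName" "")
    · simp [h]
    · simp only [Bool.not_eq_true] at h
      simp [h, PySem.Dict.getD_of_not_contains gpd 0 h]
  rw [hf]

-- B's dict comprehension over the deduped names has exactly those pairs as items.
lemma giocatorePiuEdizioni_alt_items (w : List (List (String × String))) :
    giocatorePiuEdizioni_alt w =
      (PySem.Set.ofList (w.map (fun v => (PySem.Dict.ofList v).getD "FullName" ""))).map
        (fun n => (n, (List.count n (w.map (fun v => (PySem.Dict.ofList v).getD "FullName" "")) : Int))) := by
  unfold giocatorePiuEdizioni_alt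
  simp only [PySem.List.dedup_eq_ofList, PySem.List.count_eq]
  generalize (w.map (fun v => (PySem.Dict.ofList v).getD "FullName" "")) = names
  rw [show ∀ (ps : List (String × Int)), PySem.Dict.ofList ps =
        List.foldl (fun acc p => acc.insert p.1 p.2) PySem.Dict.empty ps from fun _ => rfl]
  rw [PySem.Dict.items_foldl_insert_fresh _ Prod.fst Prod.snd PySem.Dict.empty
        (fun a _ => PySem.Dict.contains_empty a.1)
        (by
          have h1 : (Prod.fst ∘ fun n => (n, (List.count n names : Int))) = id := rfl
          rw [List.map_map, h1, List.map_id]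
          exact PySem.Set.nodup_ofList names)]
  simp [PySem.Dict.empty]

-- ===== VERDICT (by name: the statement is the Claim_ definition above) =====
theorem giocatorePiuEdizioni_spec : Claim_equal_giocatorePiuEdizioni := by
  intro w _ _
  unfold Spec_giocatorePiuEdizioni
  rw [giocatorePiuEdizioni_eq_counter_items, giocatorePiuEdizioni_alt_items,
    PySem.Dict.items_counter]
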